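-- pv_equiv track=rewrite | github.com/linuxmunchies/Python_Coursework | oldlabs/lab8.py | ssnChecker
-- ===== SOURCE A (Python) =====
-- def ssnChecker(s):
--     # Length must be == 11. Dash must be in s[3] and s[6].
--     # numbers must be in spots (0:2), (4:5), and (7:10)
--     if len(s) == 11:
--         if (s[3] == '-' and s[6] == '-'):
--             tempList = [x for x in s if x.isdigit()]
--             if len(tempList) == 9:
--                 return(True)
--             else:
--                 return(False)
--         else:
--             return(False)
--     else:
--         return(False)
-- ===== SOURCE B (Python) =====
-- def ssnChecker(s):
--     parts = s.split('-')
--     if len(parts) != 3: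
--         return False
--     area, group, serial = parts
--     return (len(area) == 3 and len(group) == 2 and len(serial) == 4
--             and area.isdigit() and group.isdigit() and serial.isdigit())
-- ===== Notes on version B (the rewrite author's own statement) =====
-- stated objective: idiomatic
-- what changed: B parses the SSN by splitting on the dash separator and validating the three fields' lengths (3/2/4) and digit-ness, instead of A's global length check, fixed dash positions and a whole-string digit count via a comprehension list.
import Mathlib
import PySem

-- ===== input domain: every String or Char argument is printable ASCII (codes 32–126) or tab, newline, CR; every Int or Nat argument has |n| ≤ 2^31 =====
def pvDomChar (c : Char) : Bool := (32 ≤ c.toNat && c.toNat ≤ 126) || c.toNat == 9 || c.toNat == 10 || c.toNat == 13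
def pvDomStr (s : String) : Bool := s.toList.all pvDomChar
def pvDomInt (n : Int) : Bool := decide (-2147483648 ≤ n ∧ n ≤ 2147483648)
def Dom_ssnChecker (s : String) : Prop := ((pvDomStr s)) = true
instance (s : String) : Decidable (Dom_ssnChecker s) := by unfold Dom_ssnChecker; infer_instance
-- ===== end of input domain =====

-- B validates the three dash-separated fields (lengths 3/2/4, all digits) instead of A's
-- global length / dash-position / digit-count checks; same results, a different decomposition.

-- ===== PORT A =====
def ssnChecker (s : String) : Bool :=
  if PySem.Str.len s == 11 then
    if PySem.Str.pyGet? s 3 == some '-' && PySem.Str.pyGet? s 6 == some '-' then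
      let tempList : List Char := s.toList.filter (fun x => PySem.Chars.isdigit x)
      if PySem.Chars.len tempList == 9 then true else false
    else false
  else false

-- ===== PORT B =====
def ssnChecker_alt (s : String) : Bool :=
  match PySem.Str.split? s "-" with
  | some [area, group, serial] =>
      PySem.Str.len area == 3 && PySem.Str.len group == 2 && PySem.Str.len serial == 4 &&
      PySem.Str.strIsdigit area && PySem.Str.strIsdigit group && PySem.Str.strIsdigit serial
  | _ => false

-- ===== PRECONDITION & SPEC =====
def Spec_ssnChecker (s : String) (out : Bool) : Prop := out = ssnChecker_alt s
instance (s : String) (out : Bool) : Decidable (Spec_ssnChecker s out) := by unfold Spec_ssnChecker; infer_instance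

-- ===== CLAIM (what is proved, stated in full; the proofs are below) =====
def Claim_equal_ssnChecker : Prop := ∀ (s : String), Dom_ssnChecker s → Spec_ssnChecker s (ssnChecker s)

-- ===== LEMMAS AND PROOFS =====

def mySplit : List Char → List (List Char)
  | [] => [[]]
  | c :: t => if c = '-' then [] :: mySplit t else (mySplit t).modifyHead (c :: ·)

lemma mySplit_shape (l : List Char) : ∃ h t, mySplit l = h :: t := by
  cases l with
  | nil => exact ⟨[], [], rfl⟩
  | cons c t =>
    simp only [mySplit]
    split
    · exact ⟨_, _, rfl⟩
    · obtain ⟨h, t', ht⟩ := mySplit_shape t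
      exact ⟨_, _, by rw [ht]; rfl⟩

lemma go_eq (l : List Char) : ∀ (fuel : Nat) (cur : List Char) (acc : List (List Char)),
    l.length < fuel →
    PySem.Chars.splitOn.go ['-'] fuel l cur acc
      = acc.reverse ++ (mySplit l).modifyHead (cur.reverse ++ ·) := by
  induction l with
  | nil =>
    intro fuel cur acc h
    match fuel, h with
    | fuel + 1, _ => simp [PySem.Chars.splitOn.go, mySplit]
  | cons c t ih =>
    intro fuel cur acc h
    match fuel, h with
    | fuel + 1, h =>
      by_cases hc : c = '-'
      · subst hc
        have hpre : List.isPrefixOf ['-'] ('-' :: t) = true := by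
          simp [List.isPrefixOf]
        rw [show PySem.Chars.splitOn.go ['-'] (fuel + 1) ('-' :: t) cur acc
              = PySem.Chars.splitOn.go ['-'] fuel t [] (cur.reverse :: acc) by
            simp [PySem.Chars.splitOn.go, hpre]]
        rw [ih fuel [] (cur.reverse :: acc) (by simpa using h)]
        obtain ⟨hd, tl, hm⟩ := mySplit_shape t
        simp [mySplit, hm, List.modifyHead]
      · have hpre : List.isPrefixOf ['-'] (c :: t) = false := by
          simp [List.isPrefixOf]; exact fun hh => hc hh.symm
        rw [show PySem.Chars.splitOn.go ['-'] (fuel + 1) (c :: t) cur acc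
              = PySem.Chars.splitOn.go ['-'] fuel t (c :: cur) acc by
            simp [PySem.Chars.splitOn.go, hpre]]
        rw [ih fuel (c :: cur) acc (by simpa using h)]
        obtain ⟨hd, tl, hm⟩ := mySplit_shape t
        simp [mySplit, hm, hc, List.modifyHead]

lemma splitOn_single (cs : List Char) : PySem.Chars.splitOn cs ['-'] = mySplit cs := by
  unfold PySem.Chars.splitOn
  rw [go_eq cs (cs.length + 1) [] [] (by omega)]
  obtain ⟨hd, tl, hm⟩ := mySplit_shape cs
  simp [hm, List.modifyHead]

lemma mySplit_nodash (l : List Char) (h : ∀ x ∈ l, x ≠ '-') : mySplit l = [l] := by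
  induction l with
  | nil => rfl
  | cons c t ih =>
    have hc : c ≠ '-' := h c (by simp)
    simp [mySplit, hc, ih (fun x hx => h x (by simp [hx])), List.modifyHead]

lemma mySplit_append_nodash (a r : List Char) (h : ∀ x ∈ a, x ≠ '-') :
    mySplit (a ++ '-' :: r) = a :: mySplit r := by
  induction a with
  | nil => simp [mySplit]
  | cons c t ih =>
    have hc : c ≠ '-' := h c (by simp)
    rw [List.cons_append]
    simp only [mySplit, if_neg hc, ih (fun x hx => h x (by simp [hx]))]
    rfl

def joinDash : List (List Char) → List Char
  | [] => []
  | [p] => p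
  | p :: ps => p ++ '-' :: joinDash ps

lemma joinDash_mySplit (cs : List Char) : joinDash (mySplit cs) = cs := by
  induction cs with
  | nil => rfl
  | cons c t ih =>
    obtain ⟨hd, tl, hm⟩ := mySplit_shape t
    by_cases hc : c = '-'
    · subst hc
      rw [show mySplit ('-' :: t) = [] :: mySplit t from by simp [mySplit]]
      rw [hm, show joinDash ([] :: hd :: tl) = [] ++ '-' :: joinDash (hd :: tl) from rfl,
        ← hm, ih]
      rfl
    · rw [show mySplit (c :: t) = (mySplit t).modifyHead (c :: ·) from by simp [mySplit, hc]]
      rw [hm, List.modifyHead]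
      have ht : joinDash (hd :: tl) = t := by rw [← hm, ih]
      cases tl with
      | nil => simp [joinDash] at ht ⊢; simpa using ht
      | cons q qs =>
        rw [show joinDash ((c :: hd) :: q :: qs) = (c :: hd) ++ '-' :: joinDash (q :: qs) from rfl]
        rw [show joinDash (hd :: q :: qs) = hd ++ '-' :: joinDash (q :: qs) from rfl] at ht
        simp [← ht]

lemma mySplit_parts_nodash (cs : List Char) :
    ∀ p ∈ mySplit cs, ∀ x ∈ p, x ≠ '-' := by
  induction cs with
  | nil => intro p hp; simp [mySplit] at hp; subst hp; simp
  | cons c t ih =>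
    intro p hp
    by_cases hc : c = '-'
    · subst hc
      rw [show mySplit ('-' :: t) = [] :: mySplit t from by simp [mySplit]] at hp
      rw [List.mem_cons] at hp
      rcases hp with hp | hp
      · subst hp; simp
      · exact ih p hp
    · rw [show mySplit (c :: t) = (mySplit t).modifyHead (c :: ·) from by simp [mySplit, hc]] at hp
      obtain ⟨hd, tl, hm⟩ := mySplit_shape t
      rw [hm, List.modifyHead, List.mem_cons] at hp
      rcases hp with hp | hp
      · subst hp
        intro x hx
        rcases List.mem_cons.mp hx with rfl | hx
        · exact hc
        · exact ih hd (by rw [hm]; simp) x hx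
      · exact ih p (by rw [hm]; simp [hp])

def SSNShape (t : List Char) : Prop :=
  ∃ a b c : List Char, t = a ++ '-' :: (b ++ '-' :: c) ∧
    a.length = 3 ∧ b.length = 2 ∧ c.length = 4 ∧
    a.all PySem.Chars.isdigit = true ∧ b.all PySem.Chars.isdigit = true ∧
    c.all PySem.Chars.isdigit = true

def listA (t : List Char) : Bool :=
  if (t.length : Int) == 11 then
    if PySem.List.pyGet? t 3 == some '-' && PySem.List.pyGet? t 6 == some '-' then
      if ((t.filter (fun x => PySem.Chars.isdigit x)).length : Int) == 9 then true else false
    else false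
  else false

lemma A_iff_list (t : List Char) : listA t = true ↔ SSNShape t := by
  constructor
  · intro h
    unfold listA at h
    split_ifs at h with h1 h2 h3
    · have hlen : t.length = 11 := by
        have := of_decide_eq_true h1; exact_mod_cast this
      clear h h1
      match t, hlen with
      | [c0,c1,c2,c3,c4,c5,c6,c7,c8,c9,c10], _ =>
        simp [PySem.List.pyGet?, PySem.List.pyIdx?] at h2
        obtain ⟨hc3, hc6⟩ := h2
        subst hc3; subst hc6
        rw [← List.countP_eq_length_filter] at h3
        have h9 : ([c0,c1,c2,'-',c4,c5,'-',c7,c8,c9,c10].countP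
            (fun x => PySem.Chars.isdigit x)) = 9 := by
          have := of_decide_eq_true h3; exact_mod_cast this
        simp only [List.countP_cons, List.countP_nil,
          show PySem.Chars.isdigit '-' = false from rfl] at h9
        simp only [show ∀ x : Char,
            (if PySem.Chars.isdigit x = true then 1 else 0) = (PySem.Chars.isdigit x).toNat
          from fun x => by cases hx : PySem.Chars.isdigit x <;> simp] at h9
        simp only [show (if false = true then (1:Nat) else 0) = 0 from rfl] at h9
        have bnd : ∀ b : Bool, b.toNat ≤ 1 := fun b => by cases b <;> simp
        have d0 := bnd (PySem.Chars.isdigit c0)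
        have d1 := bnd (PySem.Chars.isdigit c1)
        have d2 := bnd (PySem.Chars.isdigit c2)
        have d4 := bnd (PySem.Chars.isdigit c4)
        have d5 := bnd (PySem.Chars.isdigit c5)
        have d7 := bnd (PySem.Chars.isdigit c7)
        have d8 := bnd (PySem.Chars.isdigit c8)
        have d9 := bnd (PySem.Chars.isdigit c9)
        have d10 := bnd (PySem.Chars.isdigit c10)
        have dig : ∀ x : Char, (PySem.Chars.isdigit x).toNat = 1 →
            PySem.Chars.isdigit x = true := fun x hx => by
          cases h : PySem.Chars.isdigit x <;> simp [h] at hx ⊢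
        have hd0 : PySem.Chars.isdigit c0 = true := dig c0 (by omega)
        have hd1 : PySem.Chars.isdigit c1 = true := dig c1 (by omega)
        have hd2 : PySem.Chars.isdigit c2 = true := dig c2 (by omega)
        have hd4 : PySem.Chars.isdigit c4 = true := dig c4 (by omega)
        have hd5 : PySem.Chars.isdigit c5 = true := dig c5 (by omega)
        have hd7 : PySem.Chars.isdigit c7 = true := dig c7 (by omega)
        have hd8 : PySem.Chars.isdigit c8 = true := dig c8 (by omega)
        have hd9 : PySem.Chars.isdigit c9 = true := dig c9 (by omega)
        have hd10 : PySem.Chars.isdigit c10 = true := dig c10 (by omega)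
        exact ⟨[c0,c1,c2], [c4,c5], [c7,c8,c9,c10], by simp, rfl, rfl, rfl,
          by simp [hd0, hd1, hd2], by simp [hd4, hd5], by simp [hd7, hd8, hd9, hd10]⟩
  · rintro ⟨a, b, c, rfl, ha, hb, hc, hda, hdb, hdc⟩
    match a, ha, b, hb, c, hc with
    | [a0,a1,a2], _, [b0,b1], _, [c0,c1,c2,c3], _ =>
      simp only [List.all_cons, List.all_nil, Bool.and_eq_true] at hda hdb hdc
      unfold listA
      simp [PySem.List.pyGet?, PySem.List.pyIdx?, List.filter,
        hda.1, hda.2.1, hda.2.2.1, hdb.1, hdb.2.1, hdc.1, hdc.2.1, hdc.2.2.1, hdc.2.2.2.1,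
        show PySem.Chars.isdigit '-' = false from rfl]

lemma shape_mySplit {a b c : List Char}
    (hna : ∀ x ∈ a, x ≠ '-') (hnb : ∀ x ∈ b, x ≠ '-') (hnc : ∀ x ∈ c, x ≠ '-') :
    mySplit (a ++ '-' :: (b ++ '-' :: c)) = [a, b, c] := by
  rw [mySplit_append_nodash a _ hna, mySplit_append_nodash b _ hnb, mySplit_nodash c hnc]

lemma isdigit_ne_dash {x : Char} (h : PySem.Chars.isdigit x = true) : x ≠ '-' := by
  rintro rfl; simp [PySem.Chars.isdigit] at h

lemma B_iff (s : String) : ssnChecker_alt s = true ↔ SSNShape s.toList := by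
  have hsplit : PySem.Str.split? s "-" = some ((mySplit s.toList).map String.ofList) := by
    unfold PySem.Str.split?
    rw [show ("-" : String).toList = ['-'] from rfl]
    unfold PySem.Chars.split?
    simp [splitOn_single]
  unfold ssnChecker_alt
  rw [hsplit]
  rcases hm : mySplit s.toList with _ | ⟨a, _ | ⟨b, _ | ⟨c, _ | ⟨d, r⟩⟩⟩⟩
  · obtain ⟨h, t, h'⟩ := mySplit_shape s.toList; rw [hm] at h'; exact absurd h' (by simp)
  all_goals
    have hj : joinDash (mySplit s.toList) = s.toList := joinDash_mySplit s.toList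
    rw [hm] at hj
  -- one part
  · simp only [List.map]
    constructor
    · intro h; exact absurd h (by simp)
    · rintro ⟨a', b', c', ht, ha, hb, hc, hda, hdb, hdc⟩
      have : mySplit s.toList = [a', b', c'] := by
        rw [ht]
        exact shape_mySplit (fun x hx => isdigit_ne_dash (by have := List.all_eq_true.mp hda x hx; simpa using this))
          (fun x hx => isdigit_ne_dash (by have := List.all_eq_true.mp hdb x hx; simpa using this))
          (fun x hx => isdigit_ne_dash (by have := List.all_eq_true.mp hdc x hx; simpa using this))
      rw [hm] at this; exact absurd this (by simp)
  -- two parts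
  · simp only [List.map]
    constructor
    · intro h; exact absurd h (by simp)
    · rintro ⟨a', b', c', ht, ha, hb, hc, hda, hdb, hdc⟩
      have : mySplit s.toList = [a', b', c'] := by
        rw [ht]
        exact shape_mySplit (fun x hx => isdigit_ne_dash (by have := List.all_eq_true.mp hda x hx; simpa using this))
          (fun x hx => isdigit_ne_dash (by have := List.all_eq_true.mp hdb x hx; simpa using this))
          (fun x hx => isdigit_ne_dash (by have := List.all_eq_true.mp hdc x hx; simpa using this))
      rw [hm] at this; exact absurd this (by simp)
  -- three parts
  · simp only [List.map]
    have ht : s.toList = a ++ '-' :: (b ++ '-' :: c) := by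
      rw [← hj]; rfl
    have hnd := mySplit_parts_nodash s.toList
    rw [hm] at hnd
    constructor
    · intro h
      simp only [PySem.Str.len_eq, String.toList_ofList, PySem.Str.strIsdigit_eq,
        PySem.Chars.strIsdigit, Bool.and_eq_true, beq_iff_eq] at h
      obtain ⟨⟨⟨⟨⟨ha, hb⟩, hc⟩, hda⟩, hdb⟩, hdc⟩ := h
      exact ⟨a, b, c, ht, by exact_mod_cast ha, by exact_mod_cast hb, by exact_mod_cast hc,
        hda.2, hdb.2, hdc.2⟩
    · rintro ⟨a', b', c', ht', ha, hb, hc, hda, hdb, hdc⟩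
      have heq : mySplit s.toList = [a', b', c'] := by
        rw [ht']
        exact shape_mySplit (fun x hx => isdigit_ne_dash (by have := List.all_eq_true.mp hda x hx; simpa using this))
          (fun x hx => isdigit_ne_dash (by have := List.all_eq_true.mp hdb x hx; simpa using this))
          (fun x hx => isdigit_ne_dash (by have := List.all_eq_true.mp hdc x hx; simpa using this))
      rw [hm] at heq
      obtain ⟨rfl, rfl, rfl⟩ : a = a' ∧ b = b' ∧ c = c' := by
        simpa using heq
      simp only [PySem.Str.len_eq, String.toList_ofList, PySem.Str.strIsdigit_eq,
        PySem.Chars.strIsdigit, Bool.and_eq_true, beq_iff_eq]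
      refine ⟨⟨⟨⟨⟨by exact_mod_cast ha, by exact_mod_cast hb⟩, by exact_mod_cast hc⟩,
        ⟨?_, hda⟩⟩, ⟨?_, hdb⟩⟩, ⟨?_, hdc⟩⟩ <;>
        simp <;> rintro rfl <;> simp_all
  -- four or more parts
  · simp only [List.map]
    constructor
    · intro h; exact absurd h (by simp)
    · rintro ⟨a', b', c', ht, ha, hb, hc, hda, hdb, hdc⟩
      have : mySplit s.toList = [a', b', c'] := by
        rw [ht]
        exact shape_mySplit (fun x hx => isdigit_ne_dash (by have := List.all_eq_true.mp hda x hx; simpa using this))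
          (fun x hx => isdigit_ne_dash (by have := List.all_eq_true.mp hdb x hx; simpa using this))
          (fun x hx => isdigit_ne_dash (by have := List.all_eq_true.mp hdc x hx; simpa using this))
      rw [hm] at this; exact absurd this (by simp)

lemma A_eq_list (s : String) : ssnChecker s = listA s.toList := by
  simp only [ssnChecker, listA, PySem.Str.len_eq, PySem.Str.pyGet?_eq,
    PySem.Chars.pyGet?_eq_listPyGet?, PySem.Chars.len]
  rfl

lemma A_iff (s : String) : ssnChecker s = true ↔ SSNShape s.toList := by
  rw [A_eq_list]; exact A_iff_list s.toList

-- ===== VERDICT (by name: the statement is the Claim_ definition above) =====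
theorem ssnChecker_spec : Claim_equal_ssnChecker := by
  intro s _
  unfold Spec_ssnChecker
  cases hA : ssnChecker s with
  | true => exact ((B_iff s).mpr ((A_iff s).mp hA)).symm
  | false =>
    cases hB : ssnChecker_alt s with
    | false => rfl
    | true => rw [← hA, (A_iff s).mpr ((B_iff s).mp hB)]
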